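-- pv_equiv track=rewrite | github.com/sbu-dsl/stonybook | stonybook/preprocessing/hathitrust/main.py | strip_start_end_numerals
-- ===== SOURCE A (Python) =====
-- def strip_start_end_numerals(header, body, footer):
--     if not body:
--         return (header, body, footer)
--     body_lines = body.split('\n')
--     while body_lines and body_lines[0].strip() and (any(c.isnumeric() for c in body_lines[0].split()[0])
--         or any(c.isnumeric() for c in body_lines[0].split()[-1])):
--         header += '\n' + body_lines[0]
--         body_lines = body_lines[1:]
--     while body_lines and body_lines[-1].strip() and (any(c.isnumeric() for c in body_lines[-1].split()[0])
--         or any(c.isnumeric() for c in body_lines[-1].split()[-1])):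
--         footer = body_lines[-1] + '\n' + footer
--         body_lines = body_lines[:-1]
--     return (header, '\n'.join(body_lines), footer)
-- ===== SOURCE B (Python) =====
-- def _hit(line):
--     toks = line.split()
--     return bool(line.strip()) and (any(c.isnumeric() for c in toks[0])
--                            or any(c.isnumeric() for c in toks[-1]))
--
-- def strip_start_end_numerals(header, body, footer):
--     if not body:
--         return (header, body, footer)
--     lines = body.split('\n')
--     i = 0
--     n = len(lines)
--     while i < n and _hit(lines[i]):
--         i += 1
--     j = n
--     while j > i and _hit(lines[j - 1]):
--         j -= 1
--     return ('\n'.join([header] + lines[:i]),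
--             '\n'.join(lines[i:j]),
--             '\n'.join(lines[j:] + [footer]))
-- ===== Notes on version B (the rewrite author's own statement) =====
-- stated objective: alternative
-- what changed: A strips lines by repeatedly reslicing the line list (body_lines[1:]/[:-1]) and concatenating onto header/footer one removed line at a time; B finds the two cut indices with front and back scans, slices the line list once and builds each of the three results with a single join.
import Mathlib
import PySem

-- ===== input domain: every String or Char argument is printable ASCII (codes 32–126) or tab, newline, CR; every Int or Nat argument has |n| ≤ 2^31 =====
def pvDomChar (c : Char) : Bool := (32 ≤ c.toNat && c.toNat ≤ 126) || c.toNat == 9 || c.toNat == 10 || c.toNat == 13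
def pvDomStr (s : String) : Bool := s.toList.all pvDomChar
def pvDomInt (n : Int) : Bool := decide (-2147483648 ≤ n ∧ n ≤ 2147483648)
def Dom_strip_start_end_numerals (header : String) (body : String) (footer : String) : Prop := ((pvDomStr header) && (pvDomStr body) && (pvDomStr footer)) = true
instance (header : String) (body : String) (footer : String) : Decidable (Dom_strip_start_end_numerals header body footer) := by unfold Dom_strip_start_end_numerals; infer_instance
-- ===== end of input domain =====

-- B replaces A's destructive loop (reslice body_lines[1:]/[:-1] and concatenate strings per removed
-- line) by two scans that find the cut indices, then one slice and one join per piece (objective: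
-- alternative). Python returns a 3-tuple of strings; ported as List String.

-- ===== PORT A =====
-- shared line test: "line.strip() and (any numeral in first word or any numeral in last word)".
-- c.isnumeric() is ported as PySem.Chars.isdigit — exact on the printable-ASCII domain, where the
-- numeric characters are exactly '0'..'9'.  toks[0]/toks[-1] are guarded by strip ≠ "" (so toks ≠ []):
-- headD/getLastD with a dummy default are exact there.
def pvHit (line : String) : Bool :=
  decide (PySem.Str.strip line ≠ "") &&
    ((PySem.Str.split₀ line).headD "").toList.any PySem.Chars.isdigit ||
      ((PySem.Str.split₀ line).getLastD "").toList.any PySem.Chars.isdigit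

-- first while loop: strip hit lines off the front, appending each to header
def pvHeadLoop : String → List String → String × List String
  | header, [] => (header, [])
  | header, l :: rest =>
    if pvHit l then pvHeadLoop (header ++ "\n" ++ l) rest
    else (header, l :: rest)

-- second while loop: strip hit lines off the back (while body_lines and hit(body_lines[-1]):
-- footer = body_lines[-1] + '\n' + footer; body_lines = body_lines[:-1])
def pvTailLoop (lines : List String) (footer : String) : List String × String :=
  if h : lines = [] then (lines, footer)
  else
    let l := lines.getLast h
    if pvHit l then pvTailLoop lines.dropLast (l ++ "\n" ++ footer)
    else (lines, footer)
termination_by lines.length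
decreasing_by
  have := List.length_pos_iff.mpr h
  simp [List.length_dropLast]; omega

def strip_start_end_numerals (header : String) (body : String) (footer : String) : List String :=
  if body = "" then [header, body, footer]
  else
    let p1 := pvHeadLoop header ((PySem.Str.split? body "\n").getD [])
    let p2 := pvTailLoop p1.2 footer
    [p1.1, PySem.Str.join "\n" p2.1, p2.2]

-- ===== PORT B =====
-- Source B: scan from the front for the first non-hit line, scan from the back over the remainder,
-- then slice the line list once and join each of the three pieces once.
def strip_start_end_numerals_alt (header : String) (body : String) (footer : String) : List String :=
  if body = "" then [header, body, footer]
  else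
    let lines := (PySem.Str.split? body "\n").getD []
    let front := lines.takeWhile pvHit                     -- lines[:i], i from the first while loop
    let rest := lines.drop front.length                    -- lines[i:]
    let back := (rest.reverse.takeWhile pvHit).reverse     -- lines[j:], j from the second while loop
    let mid := rest.take (rest.length - back.length)       -- lines[i:j]
    [PySem.Str.join "\n" (header :: front),
     PySem.Str.join "\n" mid,
     PySem.Str.join "\n" (back ++ [footer])]

-- ===== PRECONDITION & SPEC =====
def Spec_strip_start_end_numerals (header : String) (body : String) (footer : String) (out : List String) : Prop := out = strip_start_end_numerals_alt header body footer
instance (header : String) (body : String) (footer : String) (out : List String) : Decidable (Spec_strip_start_end_numerals header body footer out) := by unfold Spec_strip_start_end_numerals; infer_instance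

-- ===== CLAIM (what is proved, stated in full; the proofs are below) =====
def Claim_equal_strip_start_end_numerals : Prop := ∀ (header : String) (body : String) (footer : String), Dom_strip_start_end_numerals header body footer → Spec_strip_start_end_numerals header body footer (strip_start_end_numerals header body footer)

-- ===== LEMMAS AND PROOFS =====

-- '\n'.join of a nonempty list, as a left fold / right fold of ' ++ "\n" ++ '
theorem pv_join_singleton (a : String) : PySem.Str.join "\n" [a] = a := by
  apply String.toList_inj.mp
  simp [PySem.Str.toList_join, PySem.Chars.join_singleton]

theorem pv_join_cons (a : String) (l : List String) (h : l ≠ []) :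
    PySem.Str.join "\n" (a :: l) = a ++ "\n" ++ PySem.Str.join "\n" l := by
  cases l with
  | nil => exact absurd rfl h
  | cons b t =>
    apply String.toList_inj.mp
    simp [PySem.Str.toList_join, PySem.Chars.join_cons_cons]

theorem pv_foldl_append_left (l : List String) (a b : String) :
    l.foldl (fun h x => h ++ "\n" ++ x) (b ++ a) = b ++ l.foldl (fun h x => h ++ "\n" ++ x) a := by
  induction l generalizing a with
  | nil => rfl
  | cons x xs ih =>
    have hassoc : (b ++ a) ++ "\n" ++ x = b ++ (a ++ "\n" ++ x) := by
      simp [String.append_assoc]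
    rw [List.foldl_cons, List.foldl_cons, hassoc, ih]

theorem pv_join_eq_foldl (front : List String) (h : String) :
    PySem.Str.join "\n" (h :: front) = front.foldl (fun acc x => acc ++ "\n" ++ x) h := by
  induction front generalizing h with
  | nil => exact pv_join_singleton h
  | cons x xs ih =>
    rw [pv_join_cons h (x :: xs) (by simp), ih, List.foldl_cons,
        String.append_assoc, pv_foldl_append_left xs x (h ++ "\n")]
    simp [String.append_assoc]

theorem pv_join_concat_eq_foldr (back : List String) (f : String) :
    PySem.Str.join "\n" (back ++ [f]) = back.foldr (fun x acc => x ++ "\n" ++ acc) f := by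
  induction back with
  | nil => exact pv_join_singleton f
  | cons x xs ih => rw [List.cons_append, pv_join_cons x (xs ++ [f]) (by simp), ih]; rfl

theorem pv_headLoop_eq (lines : List String) (header : String) :
    pvHeadLoop header lines =
      ((lines.takeWhile pvHit).foldl (fun acc x => acc ++ "\n" ++ x) header,
       lines.dropWhile pvHit) := by
  induction lines generalizing header with
  | nil => rfl
  | cons l rest ih =>
    by_cases h : pvHit l
    · simp [pvHeadLoop, h, ih]
    · simp [pvHeadLoop, h]

theorem pv_drop_takeWhile (l : List String) (p : String → Bool) :
    l.drop (l.takeWhile p).length = l.dropWhile p := by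
  induction l with
  | nil => rfl
  | cons x xs ih =>
    by_cases h : p x
    · simp [h, ih]
    · simp [h]

theorem pv_tailLoop_eq (lines : List String) (footer : String) :
    pvTailLoop lines footer =
      (lines.take (lines.length - (lines.reverse.takeWhile pvHit).length),
       (lines.reverse.takeWhile pvHit).reverse.foldr (fun x acc => x ++ "\n" ++ acc) footer) := by
  induction lines using List.reverseRecOn generalizing footer with
  | nil => simp [pvTailLoop]
  | append_singleton xs x ih =>
    have hne : xs ++ [x] ≠ [] := by simp
    rw [pvTailLoop, dif_neg hne]
    simp only [List.getLast_concat, List.dropLast_concat, List.reverse_append,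
      List.reverse_cons, List.reverse_nil, List.nil_append, List.cons_append,
      List.takeWhile_cons]
    by_cases h : pvHit x
    · simp only [h, if_true, ih, List.reverse_cons, List.foldr_append, List.foldr_cons,
        List.foldr_nil, Prod.mk.injEq]
      have hlen : (xs.reverse.takeWhile pvHit).length ≤ xs.length := by
        simpa using (List.takeWhile_prefix (l := xs.reverse) (p := pvHit)).length_le
      refine ⟨?_, trivial⟩
      have h1 : (xs ++ [x]).length - (x :: xs.reverse.takeWhile pvHit).length
          = xs.length - (xs.reverse.takeWhile pvHit).length := by
        simp [List.length_append, List.length_cons]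
      rw [h1, List.take_append_of_le_length (by omega)]
    · simp [h, List.take_of_length_le]

theorem strip_start_end_numerals_spec_aux (header body footer : String) :
    strip_start_end_numerals header body footer = strip_start_end_numerals_alt header body footer := by
  unfold strip_start_end_numerals strip_start_end_numerals_alt
  by_cases hb : body = ""
  · simp [hb]
  · simp only [hb, ite_false]
    set lines := (PySem.Str.split? body "\n").getD [] with hlines
    rw [pv_headLoop_eq]
    simp only
    rw [pv_tailLoop_eq, pv_join_eq_foldl, pv_join_concat_eq_foldr, pv_drop_takeWhile]
    simp [List.length_reverse]

-- ===== VERDICT (by name: the statement is the Claim_ definition above) =====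
theorem strip_start_end_numerals_spec : Claim_equal_strip_start_end_numerals := by
  intro header body footer _
  unfold Spec_strip_start_end_numerals
  exact strip_start_end_numerals_spec_aux header body footer
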